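-- pv_equiv track=rewrite | github.com/JoaquinFF/IngCon24-TP2 | 2.37.py | analizar_tendencias
-- ===== SOURCE A (Python) =====
-- def analizar_tendencias(hashtags, tendencias, umbral):
--     frecuencia_hashtags = {}
--     for hashtag in hashtags:
--         if hashtag in frecuencia_hashtags:
--             frecuencia_hashtags[hashtag] += 1
--         else:
--             frecuencia_hashtags[hashtag] = 1
--
--     tendencias_dict = dict(tendencias)
--
--     hashtags_frecuentes = [hashtag for hashtag, frecuencia in frecuencia_hashtags.items()
--                            if hashtag in tendencias_dict and tendencias_dict[hashtag] > umbral]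
--
--     return hashtags_frecuentes
-- ===== SOURCE B (Python) =====
-- def analizar_tendencias(hashtags, tendencias, umbral):
--     tendencias_dict = dict(tendencias)
--     vistos = set()
--     resultado = []
--     for hashtag in hashtags:
--         if hashtag not in vistos:
--             vistos.add(hashtag)
--             if hashtag in tendencias_dict and tendencias_dict[hashtag] > umbral:
--                 resultado.append(hashtag)
--     return resultado
-- ===== Notes on version B (the rewrite author's own statement) =====
-- stated objective: simpler
-- what changed: Fuses A's two passes (build a frequency dict, then a comprehension over its items) into one dedup-and-filter pass over hashtags with a seen-set, dropping the unused frequency counts entirely.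
import Mathlib
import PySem

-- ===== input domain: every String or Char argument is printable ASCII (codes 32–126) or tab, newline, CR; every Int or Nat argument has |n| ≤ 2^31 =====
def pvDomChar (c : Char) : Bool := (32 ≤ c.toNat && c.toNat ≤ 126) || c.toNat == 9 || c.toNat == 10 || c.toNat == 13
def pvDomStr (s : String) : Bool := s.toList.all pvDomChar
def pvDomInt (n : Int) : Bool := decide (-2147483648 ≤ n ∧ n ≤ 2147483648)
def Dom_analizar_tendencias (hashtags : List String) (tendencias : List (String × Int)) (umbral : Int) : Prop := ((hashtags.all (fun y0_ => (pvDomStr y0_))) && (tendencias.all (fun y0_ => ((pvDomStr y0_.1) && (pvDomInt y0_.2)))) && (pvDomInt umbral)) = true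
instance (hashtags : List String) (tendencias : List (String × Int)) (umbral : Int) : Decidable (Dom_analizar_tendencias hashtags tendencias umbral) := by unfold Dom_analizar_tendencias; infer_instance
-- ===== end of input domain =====

-- B fuses A's two passes (frequency-dict build + comprehension over its items) into one
-- dedup-and-filter pass with a seen-set, dropping the unused frequency counts (objective: simpler).

-- ===== PORT A =====
def analizar_tendencias (hashtags : List String) (tendencias : List (String × Int)) (umbral : Int) : List String :=
  let frecuencia_hashtags : PySem.Dict String Int :=
    hashtags.foldl (fun d hashtag =>
      if d.contains hashtag then d.modify hashtag 0 (· + 1)   -- frecuencia_hashtags[hashtag] += 1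
      else d.insert hashtag 1) PySem.Dict.empty               -- frecuencia_hashtags[hashtag] = 1
  let tendencias_dict : PySem.Dict String Int := PySem.Dict.ofList tendencias
  ((frecuencia_hashtags.items.filter (fun p =>
      tendencias_dict.contains p.1 && decide (tendencias_dict.getD p.1 0 > umbral))).map (fun p => p.1))

-- ===== PORT B =====
def analizar_tendencias_alt (hashtags : List String) (tendencias : List (String × Int)) (umbral : Int) : List String :=
  let tendencias_dict : PySem.Dict String Int := PySem.Dict.ofList tendencias
  (hashtags.foldl (fun (st : PySem.Set String × List String) hashtag =>
      if PySem.Set.contains st.1 hashtag then st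
      else (PySem.Set.add st.1 hashtag,
            if tendencias_dict.contains hashtag && decide (tendencias_dict.getD hashtag 0 > umbral)
            then st.2 ++ [hashtag] else st.2))
    (PySem.Set.empty, [])).2

-- ===== PRECONDITION & SPEC =====
def Spec_analizar_tendencias (hashtags : List String) (tendencias : List (String × Int)) (umbral : Int) (out : List String) : Prop := out = analizar_tendencias_alt hashtags tendencias umbral
instance (hashtags : List String) (tendencias : List (String × Int)) (umbral : Int) (out : List String) : Decidable (Spec_analizar_tendencias hashtags tendencias umbral out) := by unfold Spec_analizar_tendencias; infer_instance

-- ===== CLAIM (what is proved, stated in full; the proofs are below) =====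
def Claim_equal_analizar_tendencias : Prop := ∀ (hashtags : List String) (tendencias : List (String × Int)) (umbral : Int), Dom_analizar_tendencias hashtags tendencias umbral → Spec_analizar_tendencias hashtags tendencias umbral (analizar_tendencias hashtags tendencias umbral)

-- ===== LEMMAS AND PROOFS =====

-- A's branching counting loop is collections.Counter: the absent-key branch inserts 1 = 0 + 1.
theorem frec_eq_counter (hashtags : List String) :
    hashtags.foldl (fun (d : PySem.Dict String Int) hashtag =>
        if d.contains hashtag then d.modify hashtag 0 (· + 1)
        else d.insert hashtag 1) PySem.Dict.empty = PySem.Dict.counter hashtags := by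
  rw [PySem.Dict.counter_eq_foldl]
  apply PySem.List.foldl_congr_mem
  intro d x _
  by_cases hc : d.contains x
  · simp [hc]
  · simp only [Bool.not_eq_true] at hc
    simp [hc, PySem.Dict.modify, PySem.Dict.getD,
      (PySem.Dict.get?_eq_none_iff_contains d x).mpr hc]

-- B's loop invariant: starting from the set/output of a processed prefix `l`, folding the
-- remaining `xs` yields the set/output of `l ++ xs`.
theorem alt_foldl_invariant (td : PySem.Dict String Int) (umbral : Int) (xs l : List String) :
    xs.foldl (fun (st : PySem.Set String × List String) hashtag =>
        if PySem.Set.contains st.1 hashtag then st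
        else (PySem.Set.add st.1 hashtag,
              if td.contains hashtag && decide (td.getD hashtag 0 > umbral)
              then st.2 ++ [hashtag] else st.2))
      (PySem.Set.ofList l,
       (PySem.Set.ofList l).filter (fun k => td.contains k && decide (td.getD k 0 > umbral)))
    = (PySem.Set.ofList (l ++ xs),
       (PySem.Set.ofList (l ++ xs)).filter (fun k => td.contains k && decide (td.getD k 0 > umbral))) := by
  induction xs generalizing l with
  | nil => simp
  | cons x xs ih =>
    have hl : l ++ x :: xs = (l ++ [x]) ++ xs := by simp
    rw [hl, List.foldl_cons]
    by_cases hx : x ∈ PySem.Set.ofList l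
    · have hs : PySem.Set.ofList (l ++ [x]) = PySem.Set.ofList l := by
        rw [PySem.Set.ofList_append_singleton, PySem.Set.add_of_mem hx]
      have hc : PySem.Set.contains (PySem.Set.ofList l) x = true :=
        (PySem.Set.contains_iff _ _).mpr hx
      rw [if_pos hc, ← hs] at *
      exact ih (l ++ [x])
    · have hs : PySem.Set.ofList (l ++ [x]) = PySem.Set.ofList l ++ [x] := by
        rw [PySem.Set.ofList_append_singleton, PySem.Set.add_of_not_mem hx]
      have hc : ¬ PySem.Set.contains (PySem.Set.ofList l) x = true := by
        simp [hx]
      rw [if_neg hc]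
      dsimp only
      rw [PySem.Set.add_of_not_mem hx]
      have h3 : (if (td.contains x && decide (td.getD x 0 > umbral)) = true
            then (PySem.Set.ofList l).filter (fun k => td.contains k && decide (td.getD k 0 > umbral)) ++ [x]
            else (PySem.Set.ofList l).filter (fun k => td.contains k && decide (td.getD k 0 > umbral)))
          = List.filter (fun k => td.contains k && decide (td.getD k 0 > umbral)) (PySem.Set.ofList l ++ [x]) := by
        rw [List.filter_append]
        by_cases hcond : (td.contains x && decide (td.getD x 0 > umbral)) = true
        · simp [hcond]
        · simp [hcond]
      rw [h3]
      have := ih (l ++ [x])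
      rw [hs] at this
      exact this

-- ===== VERDICT (by name: the statement is the Claim_ definition above) =====
theorem analizar_tendencias_spec : Claim_equal_analizar_tendencias := by
  intro hashtags tendencias umbral _
  show analizar_tendencias hashtags tendencias umbral = analizar_tendencias_alt hashtags tendencias umbral
  unfold analizar_tendencias analizar_tendencias_alt
  dsimp only
  rw [frec_eq_counter, PySem.Dict.items_counter]
  have hB := alt_foldl_invariant (PySem.Dict.ofList tendencias) umbral hashtags []
  simp only [List.nil_append] at hB
  simp only [PySem.Set.ofList_nil, List.filter_nil] at hB
  rw [show (PySem.Set.empty : PySem.Set String) = ([] : List String) from rfl, hB]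
  rw [List.filter_map, List.map_map]
  simp [Function.comp_def]
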